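-- pv_equiv track=rewrite | github.com/matthewyeung35/Appraisal-automation | temp code.py | floor_comment_gen
-- ===== SOURCE A (Python) =====
-- def floor_comment_gen(flooring):
--     result = ('')
--     floor_type_count = 0
--     floor_type_total = len(flooring)
--     for i in flooring:
--         if i == '0':
--             result += ('hardwood')
--         elif i == '3':
--             result += ('laminate')
--         elif i == '1':
--             result += ('broadloom')
--         elif i == '2':
--             result += ('ceramic tiles')
--         if floor_type_count < (floor_type_total-2):
--             result += (', ')
--         elif floor_type_count == (floor_type_total-2):
--             result += (', and ')
--         floor_type_count += 1
--     return result
-- ===== SOURCE B (Python) =====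
-- _FLOOR_NAMES = {'0': 'hardwood', '1': 'broadloom', '2': 'ceramic tiles', '3': 'laminate'}
--
-- def floor_comment_gen(flooring):
--     names = [_FLOOR_NAMES.get(i, '') for i in flooring]
--     if not names:
--         return ''
--     if len(names) == 1:
--         return names[0]
--     return ', '.join(names[:-1]) + ', and ' + names[-1]
-- ===== Notes on version B (the rewrite author's own statement) =====
-- stated objective: simpler
-- what changed: Replaces A's single loop with a running counter and per-element separator branching by a two-phase decomposition: map each code to its name via a dict lookup, then format the name list with a closed form (empty / single / ', '.join of all but last + ', and ' + last).
import Mathlib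
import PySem

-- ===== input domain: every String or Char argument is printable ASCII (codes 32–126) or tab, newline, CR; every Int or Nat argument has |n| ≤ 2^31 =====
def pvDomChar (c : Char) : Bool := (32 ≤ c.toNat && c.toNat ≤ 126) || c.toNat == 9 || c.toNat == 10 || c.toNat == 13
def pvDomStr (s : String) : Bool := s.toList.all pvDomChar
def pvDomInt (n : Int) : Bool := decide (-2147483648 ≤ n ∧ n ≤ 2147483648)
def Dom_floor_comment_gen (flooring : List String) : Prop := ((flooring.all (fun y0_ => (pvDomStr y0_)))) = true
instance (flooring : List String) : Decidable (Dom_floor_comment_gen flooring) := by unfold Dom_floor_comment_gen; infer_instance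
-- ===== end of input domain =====

-- B (simpler): builds the list of flooring names by a dict lookup in one pass, then
-- formats it with a closed form (empty / single / join-with-", and "-before-last)
-- instead of A's running counter and per-element separator branching.

-- ===== PORT A =====
-- the body of A's for-loop: name branch, then separator branch, then count += 1
def pvStepA (floor_type_total : Int) (st : String × Int) (i : String) : String × Int :=
  let result := st.1
  let floor_type_count := st.2
  let result :=
    if i == "0" then result ++ "hardwood"
    else if i == "3" then result ++ "laminate"
    else if i == "1" then result ++ "broadloom"
    else if i == "2" then result ++ "ceramic tiles"
    else result
  let result :=
    if floor_type_count < floor_type_total - 2 then result ++ ", "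
    else if floor_type_count == floor_type_total - 2 then result ++ ", and "
    else result
  (result, floor_type_count + 1)

def floor_comment_gen (flooring : List String) : String :=
  let floor_type_total : Int := (flooring.length : Int)
  (flooring.foldl (pvStepA floor_type_total) ("", 0)).1

-- ===== PORT B =====
def pvFloorNames : PySem.Dict String String :=
  PySem.Dict.ofList [("0", "hardwood"), ("1", "broadloom"), ("2", "ceramic tiles"), ("3", "laminate")]

def floor_comment_gen_alt (flooring : List String) : String :=
  let names := flooring.map (fun i => (pvFloorNames.get? i).getD "")
  match names with
  | [] => ""
  | [x] => x
  | _ => PySem.Str.join ", " names.dropLast ++ ", and " ++ names.getLast!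

-- ===== PRECONDITION & SPEC =====
def Spec_floor_comment_gen (flooring : List String) (out : String) : Prop := out = floor_comment_gen_alt flooring
instance (flooring : List String) (out : String) : Decidable (Spec_floor_comment_gen flooring out) := by unfold Spec_floor_comment_gen; infer_instance

-- ===== CLAIM (what is proved, stated in full; the proofs are below) =====
def Claim_equal_floor_comment_gen : Prop := ∀ (flooring : List String), Dom_floor_comment_gen flooring → Spec_floor_comment_gen flooring (floor_comment_gen flooring)

-- ===== LEMMAS AND PROOFS =====

-- the name A's if-chain (resp. B's dict lookup) assigns to one code
def pvNm (i : String) : String :=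
  if i == "0" then "hardwood"
  else if i == "3" then "laminate"
  else if i == "1" then "broadloom"
  else if i == "2" then "ceramic tiles"
  else ""

lemma pvNm_eq_dict (i : String) : ((pvFloorNames.get? i).getD "") = pvNm i := by
  have hd : pvFloorNames = PySem.Dict.mk
      [("0", "hardwood"), ("1", "broadloom"), ("2", "ceramic tiles"), ("3", "laminate")] := by decide
  rw [hd]
  simp only [PySem.Dict.get?_mk_cons, pvNm]
  split_ifs <;> simp_all [PySem.Dict.get?]

-- the string both programs produce, as a structural recursion on the list
def pvGo : List String → String
  | [] => ""
  | [x] => pvNm x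
  | [x, y] => pvNm x ++ ", and " ++ pvNm y
  | x :: y :: z :: t => pvNm x ++ ", " ++ pvGo (y :: z :: t)

lemma pvStepA_fst (t : Int) (acc : String) (c : Int) (i : String) :
    pvStepA t (acc, c) i =
      ((if c < t - 2 then acc ++ pvNm i ++ ", "
        else if c == t - 2 then acc ++ pvNm i ++ ", and "
        else acc ++ pvNm i), c + 1) := by
  simp only [pvStepA, pvNm]
  split_ifs <;> simp_all [String.append_empty]

lemma pvFoldA (t : Int) (l : List String) (acc : String) (c : Int)
    (h : c + (l.length : Int) = t) :
    (l.foldl (pvStepA t) (acc, c)).1 = acc ++ pvGo l := by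
  induction l generalizing acc c with
  | nil => simp [pvGo, String.append_empty]
  | cons x rest ih =>
    rw [List.foldl_cons, pvStepA_fst]
    match rest with
    | [] =>
      have h1 : ¬ c < t - 2 := by simp at h; omega
      have h2 : ¬ (c == t - 2) = true := by simp at h ⊢; omega
      simp only [if_neg h1, if_neg h2, List.foldl_nil, pvGo]
    | [y] =>
      have h1 : ¬ c < t - 2 := by simp at h; omega
      have h2 : (c == t - 2) = true := by simp at h ⊢; omega
      rw [if_neg h1, if_pos h2, ih _ (c + 1) (by simp at h ⊢; omega)]
      simp [pvGo, String.append_assoc]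
    | y :: z :: rr =>
      have h1 : c < t - 2 := by simp at h; omega
      rw [if_pos h1, ih _ (c + 1) (by simp at h ⊢; omega)]
      simp [pvGo, String.append_assoc]

lemma pvStrJoin_singleton (s a : String) : PySem.Str.join s [a] = a :=
  String.toList_inj.mp (by simp [PySem.Str.toList_join, PySem.Chars.join_singleton])

lemma pvStrJoin_cons_cons (s a b : String) (t : List String) :
    PySem.Str.join s (a :: b :: t) = a ++ s ++ PySem.Str.join s (b :: t) :=
  String.toList_inj.mp (by simp [PySem.Str.toList_join, PySem.Chars.join_cons_cons, String.toList_append])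

lemma pvGoB (l : List String) (x y : String) :
    pvGo (x :: y :: l) =
      PySem.Str.join ", " (((x :: y :: l).map pvNm).dropLast) ++ ", and " ++
        ((x :: y :: l).map pvNm).getLast! := by
  induction l generalizing x y with
  | nil => simp [pvGo, pvStrJoin_singleton, List.getLast!]
  | cons z rr ih =>
    show pvNm x ++ ", " ++ pvGo (y :: z :: rr) = _
    rw [ih y z]
    simp only [List.map_cons, List.dropLast_cons₂]
    rw [pvStrJoin_cons_cons]
    have hlast : (pvNm x :: pvNm y :: pvNm z :: rr.map pvNm).getLast! =
        (pvNm y :: pvNm z :: rr.map pvNm).getLast! := by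
      simp [List.getLast!, List.getLast]
    rw [hlast]
    simp [String.append_assoc]

-- ===== VERDICT (by name: the statement is the Claim_ definition above) =====
theorem floor_comment_gen_spec : Claim_equal_floor_comment_gen := by
  intro flooring _
  show floor_comment_gen flooring = floor_comment_gen_alt flooring
  have hA : floor_comment_gen flooring = pvGo flooring := by
    unfold floor_comment_gen
    rw [pvFoldA _ _ _ _ (by simp)]
    exact String.empty_append
  have hmap : flooring.map (fun i => (pvFloorNames.get? i).getD "") = flooring.map pvNm :=
    List.map_congr_left (fun i _ => pvNm_eq_dict i)
  rw [hA]
  unfold floor_comment_gen_alt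
  match flooring with
  | [] => simp [pvGo]
  | [x] => simp [pvGo, pvNm_eq_dict]
  | x :: y :: t =>
    simp only [hmap, List.map_cons]
    exact pvGoB t x y
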